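-- pv_equiv track=rewrite | github.com/gkratka/statistical-modeling-agent | src/core/parser.py | _determine_script_operation
-- ===== SOURCE A (Python) =====
-- def _determine_script_operation(text: str, script_operations: list[str]) -> str:
--     """Determine specific script operation from patterns and context."""
--     # Check for specific analysis types in the text
--     text_lower = text.lower()
--
--     # ML operations
--     if any(ml_term in text_lower for ml_term in ['train', 'model', 'classifier', 'regression', 'predict', 'machine learning', 'ml']):
--         if 'predict' in text_lower:
--             return "predict"
--         elif any(term in text_lower for term in ['train', 'build', 'create', 'machine learning', 'ml']):
--             return "train_classifier"
--         else:
--             return "train_classifier"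
--
--     # Statistical operations
--     if any(stat in text_lower for stat in ['correlation', 'corr']):
--         return "correlation"
--     elif any(stat in text_lower for stat in ['mean', 'median', 'std', 'statistics', 'descriptive']):
--         return "descriptive"
--     elif 'summary' in text_lower or 'describe' in text_lower:
--         return "descriptive"
--
--     # Default based on first script operation found
--     if 'generate_script' in script_operations or 'create_script' in script_operations:
--         return "descriptive"  # Default to descriptive stats
--
--     return "descriptive"
-- ===== SOURCE B (Python) =====
-- _KEYWORDS = [
--     ("predict", 0),
--     ("train", 1), ("model", 1), ("classifier", 1), ("regression", 1),
--     ("machine learning", 1), ("ml", 1),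
--     ("correlation", 2), ("corr", 2),
-- ]
-- _CATEGORIES = ["predict", "train_classifier", "correlation", "descriptive"]
--
--
-- def _determine_script_operation(text: str, script_operations: list[str]) -> str:
--     """Single left-to-right scan of the text: at each position record the best
--     (lowest) priority rank of any keyword starting there; map the best rank
--     found to its category, defaulting to 'descriptive'."""
--     t = text.lower()
--     best = 3  # rank of the default category
--     for i in range(len(t)):
--         for kw, rank in _KEYWORDS:
--             if rank < best and t.startswith(kw, i):
--                 best = rank
--     return _CATEGORIES[best]
-- ===== Notes on version B (the rewrite author's own statement) =====
-- stated objective: alternative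
-- what changed: Instead of A's priority-ordered cascade of whole-text substring tests, B makes a single left-to-right scan over the text positions, keeping the minimum priority rank of any keyword that starts at each position, and maps the final rank to its category (default 'descriptive'); A's dead statistical/summary/script_operations branches, which always return the default, disappear.
import Mathlib
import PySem

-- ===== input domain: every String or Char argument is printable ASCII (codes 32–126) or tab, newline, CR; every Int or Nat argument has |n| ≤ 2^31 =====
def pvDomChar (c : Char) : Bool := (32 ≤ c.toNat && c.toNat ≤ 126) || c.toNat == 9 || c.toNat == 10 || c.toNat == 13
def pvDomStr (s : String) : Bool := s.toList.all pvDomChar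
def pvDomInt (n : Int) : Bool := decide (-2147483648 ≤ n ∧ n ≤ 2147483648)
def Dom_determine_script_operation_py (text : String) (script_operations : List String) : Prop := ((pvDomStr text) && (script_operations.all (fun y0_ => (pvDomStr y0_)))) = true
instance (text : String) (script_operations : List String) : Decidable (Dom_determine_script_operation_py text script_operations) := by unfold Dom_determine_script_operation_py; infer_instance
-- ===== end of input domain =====

-- B replaces A's cascade of priority-ordered substring tests by a single left-to-right
-- positional scan of the text that keeps the best (lowest) rank of any keyword starting
-- at each position, then maps the rank to its category (objective: alternative).


-- ===== PORT A =====
def determine_script_operation_py (text : String) (script_operations : List String) : String :=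
  let text_lower := PySem.Str.lower text
  -- ML operations
  if [("train" : String), "model", "classifier", "regression", "predict", "machine learning", "ml"].any
      (fun ml_term => PySem.Str.isIn ml_term text_lower) then
    if PySem.Str.isIn "predict" text_lower then "predict"
    else if [("train" : String), "build", "create", "machine learning", "ml"].any
        (fun term => PySem.Str.isIn term text_lower) then "train_classifier"
    else "train_classifier"
  -- Statistical operations
  else if [("correlation" : String), "corr"].any (fun stat => PySem.Str.isIn stat text_lower) then
    "correlation"
  else if [("mean" : String), "median", "std", "statistics", "descriptive"].any
      (fun stat => PySem.Str.isIn stat text_lower) then "descriptive"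
  else if PySem.Str.isIn "summary" text_lower || PySem.Str.isIn "describe" text_lower then
    "descriptive"
  -- Default based on first script operation found
  else if script_operations.contains "generate_script" || script_operations.contains "create_script" then
    "descriptive"
  else "descriptive"

-- ===== PORT B =====
def pvKeywords : List (List Char × Nat) :=
  [("predict".toList, 0),
   ("train".toList, 1), ("model".toList, 1), ("classifier".toList, 1), ("regression".toList, 1),
   ("machine learning".toList, 1), ("ml".toList, 1),
   ("correlation".toList, 2), ("corr".toList, 2)]

def pvCategories : List String := ["predict", "train_classifier", "correlation", "descriptive"]

-- inner loop of Source B; 't.startswith(kw, i)' is exact as 'Chars.startswith (t.drop i) kw' for i < len(t)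
def pvStep (t : List Char) (best : Nat) (i : Nat) : Nat :=
  pvKeywords.foldl (fun b p => if p.2 < b && PySem.Chars.startswith (t.drop i) p.1 then p.2 else b) best

def determine_script_operation_py_alt (text : String) (script_operations : List String) : String :=
  let t := (PySem.Str.lower text).toList
  let best := (List.range t.length).foldl (pvStep t) 3
  -- '_CATEGORIES[best]' is exact as getD: best ≤ 3 always, so Source B never raises IndexError
  pvCategories.getD best "descriptive"

-- ===== PRECONDITION & SPEC =====
def Spec_determine_script_operation_py (text : String) (script_operations : List String) (out : String) : Prop := out = determine_script_operation_py_alt text script_operations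
instance (text : String) (script_operations : List String) (out : String) : Decidable (Spec_determine_script_operation_py text script_operations out) := by unfold Spec_determine_script_operation_py; infer_instance

-- ===== CLAIM (what is proved, stated in full; the proofs are below) =====
def Claim_equal_determine_script_operation_py : Prop := ∀ (text : String) (script_operations : List String), Dom_determine_script_operation_py text script_operations → Spec_determine_script_operation_py text script_operations (determine_script_operation_py text script_operations)

-- ===== LEMMAS AND PROOFS =====

-- generic 'best (lowest) value under a test' fold, the shape of B's scan
def pvMFold {α : Type} (g : α → Nat) (m : α → Bool) (L : List α) (b : Nat) : Nat :=
  L.foldl (fun b x => if g x < b && m x then g x else b) b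

lemma pvMFold_le_init {α : Type} (g : α → Nat) (m : α → Bool) (L : List α) (b : Nat) :
    pvMFold g m L b ≤ b := by
  induction L generalizing b with
  | nil => exact Nat.le_refl b
  | cons x L ih =>
    have e : pvMFold g m (x :: L) b = pvMFold g m L (if g x < b && m x then g x else b) := rfl
    rw [e]
    by_cases h : (g x < b && m x) = true
    · rw [if_pos h]
      have hlt : g x < b := by revert h; by_cases h' : g x < b <;> simp [h']
      exact le_trans (ih _) (le_of_lt hlt)
    · rw [if_neg h]; exact ih b

lemma pvMFold_le {α : Type} (g : α → Nat) (m : α → Bool) (L : List α) (b : Nat)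
    {x : α} (hx : x ∈ L) (hm : m x = true) : pvMFold g m L b ≤ g x := by
  induction L generalizing b with
  | nil => cases hx
  | cons y L ih =>
    have e : pvMFold g m (y :: L) b = pvMFold g m L (if g y < b && m y then g y else b) := rfl
    rw [e]
    rcases List.mem_cons.mp hx with rfl | hx'
    · by_cases h : (g x < b && m x) = true
      · rw [if_pos h]; exact pvMFold_le_init g m L (g x)
      · rw [if_neg h]
        have hb : b ≤ g x := by
          rcases Nat.lt_or_ge (g x) b with hlt | hge
          · exact absurd (by simp [hlt, hm]) h
          · exact hge
        exact le_trans (pvMFold_le_init g m L b) hb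
    · split_ifs <;> exact ih _ hx'

lemma pvMFold_cases {α : Type} (g : α → Nat) (m : α → Bool) (L : List α) (b : Nat) :
    pvMFold g m L b = b ∨ ∃ x ∈ L, m x = true ∧ pvMFold g m L b = g x := by
  induction L generalizing b with
  | nil => exact Or.inl rfl
  | cons y L ih =>
    have e : pvMFold g m (y :: L) b = pvMFold g m L (if g y < b && m y then g y else b) := rfl
    rw [e]
    by_cases h : (g y < b && m y) = true
    · rw [if_pos h]
      have hmy : m y = true := by revert h; cases m y <;> simp
      rcases ih (g y) with h' | ⟨x, hx, hmx, hv⟩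
      · exact Or.inr ⟨y, by simp, hmy, h'⟩
      · exact Or.inr ⟨x, List.mem_cons_of_mem _ hx, hmx, hv⟩
    · rw [if_neg h]
      rcases ih b with h' | ⟨x, hx, hmx, hv⟩
      · exact Or.inl h'
      · exact Or.inr ⟨x, List.mem_cons_of_mem _ hx, hmx, hv⟩

-- the flattened scan: all (position, keyword-rule) pairs Source B's two nested loops visit
def pvL (t : List Char) : List (Nat × (List Char × Nat)) :=
  (List.range t.length).flatMap (fun i => pvKeywords.map (fun p => (i, p)))

def pvM (t : List Char) (x : Nat × (List Char × Nat)) : Bool :=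
  PySem.Chars.startswith (t.drop x.1) x.2.1

def pvRes (t : List Char) : Nat := pvMFold (fun x => x.2.2) (pvM t) (pvL t) 3

lemma pvScan_eq (t : List Char) :
    (List.range t.length).foldl (pvStep t) 3 = pvRes t := by
  unfold pvRes pvMFold pvL
  rw [List.foldl_flatMap]
  simp only [List.foldl_map]
  rfl

lemma pvRes_le (t : List Char) {kw : List Char} {r : Nat}
    (hkw : (kw, r) ∈ pvKeywords) (hne : kw ≠ [])
    (ho : PySem.Chars.isIn kw t = true) : pvRes t ≤ r := by
  obtain ⟨j, hpre⟩ := (PySem.Chars.exists_prefix_drop_iff_isIn kw t).mpr ho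
  have hj : j < t.length := by
    by_contra h
    rw [Nat.not_lt] at h
    rw [List.drop_eq_nil_of_le h] at hpre
    exact hne (List.prefix_nil.mp hpre)
  refine pvMFold_le _ _ _ _ (x := (j, (kw, r))) ?_ ?_
  · simp only [pvL, List.mem_flatMap, List.mem_range, List.mem_map]
    exact ⟨j, hj, (kw, r), hkw, rfl⟩
  · exact (PySem.Chars.startswith_iff _ _).mpr hpre

lemma pvRes_cases (t : List Char) :
    pvRes t = 3 ∨ ∃ kw r, (kw, r) ∈ pvKeywords ∧ PySem.Chars.isIn kw t = true ∧ pvRes t = r := by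
  rcases pvMFold_cases (fun x => x.2.2) (pvM t) (pvL t) 3 with h | ⟨x, hx, hm, hv⟩
  · exact Or.inl h
  · refine Or.inr ⟨x.2.1, x.2.2, ?_, ?_, hv⟩
    · simp only [pvL, List.mem_flatMap, List.mem_range, List.mem_map] at hx
      obtain ⟨i, _, p, hp, rfl⟩ := hx
      exact hp
    · exact (PySem.Chars.exists_prefix_drop_iff_isIn _ t).mp
        ⟨x.1, (PySem.Chars.startswith_iff _ _).mp hm⟩

lemma pvRes_eq (t : List Char) :
    pvRes t =
      (if PySem.Chars.isIn "predict".toList t then 0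
       else if (PySem.Chars.isIn "train".toList t || PySem.Chars.isIn "model".toList t ||
                PySem.Chars.isIn "classifier".toList t || PySem.Chars.isIn "regression".toList t ||
                PySem.Chars.isIn "machine learning".toList t || PySem.Chars.isIn "ml".toList t) then 1
       else if (PySem.Chars.isIn "correlation".toList t || PySem.Chars.isIn "corr".toList t) then 2
       else 3) := by
  split_ifs with h1 h2 h3
  · exact Nat.le_zero.mp (pvRes_le t (by simp [pvKeywords]) (by decide) h1)
  · have hle : pvRes t ≤ 1 := by
      simp only [Bool.or_eq_true] at h2
      rcases h2 with ((((h | h) | h) | h) | h) | h <;>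
        exact pvRes_le t (by simp [pvKeywords]) (by decide) h
    rcases pvRes_cases t with h | ⟨kw, r, hm, ho, hv⟩
    · omega
    · simp only [pvKeywords, List.mem_cons, List.not_mem_nil, or_false, Prod.mk.injEq] at hm
      rcases hm with ⟨rfl, rfl⟩ | ⟨rfl, rfl⟩ | ⟨rfl, rfl⟩ | ⟨rfl, rfl⟩ | ⟨rfl, rfl⟩ |
        ⟨rfl, rfl⟩ | ⟨rfl, rfl⟩ | ⟨rfl, rfl⟩ | ⟨rfl, rfl⟩ <;>
        first
          | exact absurd ho h1
          | exact hv
          | omega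
  · have hle : pvRes t ≤ 2 := by
      simp only [Bool.or_eq_true] at h3
      rcases h3 with h | h <;> exact pvRes_le t (by simp [pvKeywords]) (by decide) h
    simp only [Bool.or_eq_true, not_or, Bool.not_eq_true] at h2
    obtain ⟨⟨⟨⟨⟨htr, hmo⟩, hcl⟩, hre⟩, hma⟩, hml⟩ := h2
    rcases pvRes_cases t with h | ⟨kw, r, hm, ho, hv⟩
    · omega
    · simp only [pvKeywords, List.mem_cons, List.not_mem_nil, or_false, Prod.mk.injEq] at hm
      rcases hm with ⟨rfl, rfl⟩ | ⟨rfl, rfl⟩ | ⟨rfl, rfl⟩ | ⟨rfl, rfl⟩ | ⟨rfl, rfl⟩ |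
        ⟨rfl, rfl⟩ | ⟨rfl, rfl⟩ | ⟨rfl, rfl⟩ | ⟨rfl, rfl⟩ <;>
        simp_all
  · simp only [Bool.or_eq_true, not_or, Bool.not_eq_true] at h2 h3
    obtain ⟨⟨⟨⟨⟨htr, hmo⟩, hcl⟩, hre⟩, hma⟩, hml⟩ := h2
    obtain ⟨hco, hcr⟩ := h3
    rcases pvRes_cases t with h | ⟨kw, r, hm, ho, hv⟩
    · exact h
    · simp only [pvKeywords, List.mem_cons, List.not_mem_nil, or_false, Prod.mk.injEq] at hm
      rcases hm with ⟨rfl, rfl⟩ | ⟨rfl, rfl⟩ | ⟨rfl, rfl⟩ | ⟨rfl, rfl⟩ | ⟨rfl, rfl⟩ |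
        ⟨rfl, rfl⟩ | ⟨rfl, rfl⟩ | ⟨rfl, rfl⟩ | ⟨rfl, rfl⟩ <;>
        simp_all

-- ===== VERDICT (by name: the statement is the Claim_ definition above) =====
theorem determine_script_operation_py_spec : Claim_equal_determine_script_operation_py := by
  intro text script_operations _
  unfold Spec_determine_script_operation_py determine_script_operation_py determine_script_operation_py_alt
  simp only [List.any_cons, List.any_nil, Bool.or_false, PySem.Str.isIn_eq, ite_self]
  rw [pvScan_eq, pvRes_eq]
  generalize PySem.Chars.isIn "train".toList (PySem.Str.lower text).toList = b1
  generalize PySem.Chars.isIn "model".toList (PySem.Str.lower text).toList = b2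
  generalize PySem.Chars.isIn "classifier".toList (PySem.Str.lower text).toList = b3
  generalize PySem.Chars.isIn "regression".toList (PySem.Str.lower text).toList = b4
  generalize PySem.Chars.isIn "predict".toList (PySem.Str.lower text).toList = b5
  generalize PySem.Chars.isIn "machine learning".toList (PySem.Str.lower text).toList = b6
  generalize PySem.Chars.isIn "ml".toList (PySem.Str.lower text).toList = b7
  generalize PySem.Chars.isIn "correlation".toList (PySem.Str.lower text).toList = b8
  generalize PySem.Chars.isIn "corr".toList (PySem.Str.lower text).toList = b9
  cases b1 <;> cases b2 <;> cases b3 <;> cases b4 <;> cases b5 <;> cases b6 <;> cases b7 <;>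
    cases b8 <;> cases b9 <;> rfl
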